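-- pv_equiv track=rewrite | github.com/Aloksharma8767/DSA | String.py/Transformation_of_string.py | transform
-- ===== SOURCE A (Python) =====
-- def transform(A, B):
--     #code here.
--     d = dict()
--     for c in A:
--         d[c] = d.get(c,0) + 1
--     for c in B:
--         d[c] = d.get(c,0) - 1
--     if any(d.values()):
--         return -1
--     j = len(B) - 1
--     for c in A[::-1]:
--         if B[j] == c:
--             j -= 1
--     return j + 1
-- ===== SOURCE B (Python) =====
-- def transform(A, B):
--     # Validity: sort-and-compare multiset test instead of a frequency dict.
--     if sorted(A) != sorted(B):
--         return -1
--     n = len(B)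
--
--     def ok(k):
--         # is the length-k suffix of B a subsequence of A?
--         it = iter(A)
--         return all(c in it for c in B[n - k:])
--
--     # The answer is n - k* where k* is the largest k whose suffix of B is a
--     # subsequence of A; suffix-subsequence is monotone in k, so binary search.
--     lo, hi = 0, n
--     while lo < hi:
--         mid = (lo + hi + 1) // 2
--         if ok(mid):
--             lo = mid
--         else:
--             hi = mid - 1
--     return n - lo
-- ===== Notes on version B (the rewrite author's own statement) =====
-- stated objective: alternative
-- what changed: The frequency-dict anagram check becomes a sorted(A) != sorted(B) comparison, and the backward pointer walk over A[::-1] is replaced by a binary search over suffix lengths k with a forward iterator subsequence test (suffix-of-B-is-subsequence-of-A is monotone in k), returning n - k*.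
import Mathlib
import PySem

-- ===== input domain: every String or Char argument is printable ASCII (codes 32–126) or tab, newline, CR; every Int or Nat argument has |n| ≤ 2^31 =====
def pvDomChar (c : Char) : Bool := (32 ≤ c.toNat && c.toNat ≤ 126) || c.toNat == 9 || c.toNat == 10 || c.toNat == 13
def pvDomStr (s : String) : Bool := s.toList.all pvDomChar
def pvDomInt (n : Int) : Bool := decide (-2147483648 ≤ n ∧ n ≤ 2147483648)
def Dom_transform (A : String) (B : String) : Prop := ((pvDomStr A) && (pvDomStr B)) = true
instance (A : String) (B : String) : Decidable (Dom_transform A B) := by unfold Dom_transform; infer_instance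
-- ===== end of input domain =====

-- B replaces A's frequency-dict anagram check by a sorted-compare and A's backward
-- pointer walk by a binary search over suffix lengths with a forward subsequence test.

-- ===== PORT A =====
-- 'j = len(B)-1; for c in A[::-1]: if B[j] == c: j -= 1' — B[j] via pyGet?
-- (none = IndexError, never hit by Python on the branch that runs this loop);
-- A[::-1] is exactly List.reverse (PySem.List.slice?_none_none_neg_one).
def pvSuffix (Bl : List Char) (rev : List Char) : Int :=
  rev.foldl
    (fun j c =>
      match PySem.List.pyGet? Bl j with
      | some ch => if ch == c then j - 1 else j
      | none => j)
    ((Bl.length : Int) - 1)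

def transform (A : String) (B : String) : Int :=
  let d1 := A.toList.foldl (fun d c => d.insert c (d.getD c 0 + 1)) (PySem.Dict.empty (κ := Char) (ν := Int))
  let d2 := B.toList.foldl (fun d c => d.insert c (d.getD c 0 - 1)) d1
  if d2.values.any (fun v => v ≠ 0) then -1
  else pvSuffix B.toList A.toList.reverse + 1

-- ===== PORT B =====
-- 'it = iter(A); all(c in it for c in sfx)': each 'c in it' consumes the iterator
-- through the first occurrence of c — greedy forward subsequence matching.
def pvSub : List Char → List Char → Bool
  | [], _ => true
  | _ :: _, [] => false
  | c :: p, d :: t => if c == d then pvSub p t else pvSub (c :: p) t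

-- 'while lo < hi: mid = (lo+hi+1)//2; …'; ok(mid) tests B[n-mid:] against A.
def pvBS (Al : List Char) (Bl : List Char) (n : Int) (lo : Int) (hi : Int) : Int :=
  if h : lo < hi then
    let mid := PySem.Int.floordiv (lo + hi + 1) 2
    if pvSub (PySem.List.slice Bl (some (n - mid)) none) Al then pvBS Al Bl n mid hi
    else pvBS Al Bl n lo (mid - 1)
  else lo
termination_by (hi - lo).toNat
decreasing_by
  all_goals
    have hb := PySem.Int.floordiv_two_mid_bounds (lo := lo + 1) (hi := hi) (by omega)
    rw [show lo + 1 + hi = lo + hi + 1 by ring] at hb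
    omega

def transform_alt (A : String) (B : String) : Int :=
  if PySem.List.sorted A.toList (fun c => c) false ≠ PySem.List.sorted B.toList (fun c => c) false then -1
  else
    let n : Int := (B.toList.length : Int)
    n - pvBS A.toList B.toList n 0 n

-- ===== PRECONDITION & SPEC =====
def Spec_transform (A : String) (B : String) (out : Int) : Prop := out = transform_alt A B
instance (A : String) (B : String) (out : Int) : Decidable (Spec_transform A B out) := by unfold Spec_transform; infer_instance

-- ===== CLAIM (what is proved, stated in full; the proofs are below) =====
def Claim_equal_transform : Prop := ∀ (A : String) (B : String), Dom_transform A B → Spec_transform A B (transform A B)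

-- ===== LEMMAS AND PROOFS =====

-- greedy match count of pattern p inside text t (what A's backward loop computes
-- on the reversed strings, and the maximum the binary search finds)
def pvMatch : List Char → List Char → Nat
  | _, [] => 0
  | [], _ => 0
  | c :: t, d :: p => if d == c then 1 + pvMatch t p else pvMatch t (d :: p)

lemma pvMatch_le (t p : List Char) : pvMatch t p ≤ p.length := by
  induction t generalizing p with
  | nil => cases p <;> simp [pvMatch]
  | cons c t ih =>
    cases p with
    | nil => simp [pvMatch]
    | cons d p =>
      simp only [pvMatch]
      split
      · have := ih p; simp only [List.length_cons]; omega
      · exact (ih (d :: p)).trans (by simp)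

lemma pvSub_iff (p t : List Char) : pvSub p t = true ↔ p.Sublist t := by
  induction t generalizing p with
  | nil => cases p <;> simp [pvSub]
  | cons d t ih =>
    cases p with
    | nil => simp [pvSub]
    | cons c p =>
      simp only [pvSub]
      by_cases h : c = d
      · subst h
        simp [ih, List.cons_sublist_cons]
      · rw [if_neg (by simpa using h), ih, List.sublist_cons_iff]
        constructor
        · exact Or.inl
        · rintro (hs | ⟨r, hr, _⟩)
          · exact hs
          · injection hr with h1 h2
            exact absurd h1 h

lemma pvMatch_take_sublist (t p : List Char) : (p.take (pvMatch t p)).Sublist t := by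
  induction t generalizing p with
  | nil => cases p <;> simp [pvMatch]
  | cons c t ih =>
    cases p with
    | nil => simp [pvMatch]
    | cons d p =>
      simp only [pvMatch]
      split
      · next h =>
        have hd : d = c := by simpa using h
        subst hd
        rw [Nat.add_comm, List.take_succ_cons]
        exact List.cons_sublist_cons.mpr (ih p)
      · exact (ih (d :: p)).cons c

lemma pvMatch_ge (t p : List Char) (k : Nat) (hk : k ≤ p.length)
    (hs : (p.take k).Sublist t) : k ≤ pvMatch t p := by
  induction t generalizing p k with
  | nil =>
    have : p.take k = [] := List.sublist_nil.mp hs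
    rcases List.take_eq_nil_iff.mp this with h | h
    · simp [h]
    · subst h; simp only [List.length_nil, Nat.le_zero] at hk; simp [hk]
  | cons c t ih =>
    cases p with
    | nil => simp only [List.length_nil, Nat.le_zero] at hk; simp [hk]
    | cons d p =>
      cases k with
      | zero => exact Nat.zero_le _
      | succ k =>
        simp only [List.take_succ_cons] at hs
        simp only [pvMatch]
        by_cases hdc : d = c
        · subst hdc
          have hp : (p.take k).Sublist t := by
            rcases List.sublist_cons_iff.mp hs with h | ⟨r, hr, hrs⟩
            · exact List.sublist_of_cons_sublist h
            · injection hr with _ h2; subst h2; exact hrs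
          rw [if_pos (by simp)]
          have := ih p k (by simpa using hk) hp
          omega
        · rw [if_neg (by simpa using hdc)]
          have hs' : ((d :: p).take (k + 1)).Sublist t := by
            rcases List.sublist_cons_iff.mp hs with h | ⟨r, hr, _⟩
            · simpa [List.take_succ_cons] using h
            · injection hr with h1 h2
              exact absurd h1 hdc
          exact ih (d :: p) (k + 1) hk hs'

-- A's backward loop computes the greedy match of A-reversed against reversed prefixes of B
lemma pvSuffix_eq (Bl rev : List Char) (n : Nat) (h1 : rev.length ≤ n) (h2 : n ≤ Bl.length) :
    rev.foldl
      (fun j c =>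
        match PySem.List.pyGet? Bl j with
        | some ch => if ch == c then j - 1 else j
        | none => j)
      ((n : Int) - 1) = (n : Int) - 1 - pvMatch rev ((Bl.take n).reverse) := by
  induction rev generalizing n with
  | nil => cases (Bl.take n).reverse <;> simp [pvMatch]
  | cons c rest ih =>
    cases n with
    | zero => simp at h1
    | succ m =>
      have hm : m < Bl.length := by omega
      have htake : (Bl.take (m + 1)).reverse = Bl[m] :: (Bl.take m).reverse := by
        rw [List.take_add_one, List.getElem?_eq_getElem hm]
        simp
      have hget : PySem.List.pyGet? Bl (((m + 1 : Nat) : Int) - 1) = some Bl[m] := by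
        rw [show ((m + 1 : Nat) : Int) - 1 = ((m : Nat) : Int) by push_cast; ring]
        simp [PySem.List.pyGet?_natCast, List.getElem?_eq_getElem hm]
      rw [List.foldl_cons, hget, htake]
      simp only [pvMatch]
      by_cases hbc : Bl[m] == c
      · rw [if_pos hbc, if_pos hbc,
          show ((m + 1 : Nat) : Int) - 1 - 1 = ((m : Nat) : Int) - 1 by push_cast; ring,
          ih m (by simpa using h1) (by omega)]
        push_cast
        ring
      · rw [if_neg (by simpa using hbc), if_neg (by simpa using hbc),
          ih (m + 1) (by simp at h1; omega) h2, htake]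

-- the suffix test of B is the prefix test on the reversed strings
lemma ok_iff (Al Bl : List Char) (k : Nat) (hk : k ≤ Bl.length) :
    pvSub (Bl.drop (Bl.length - k)) Al = true ↔ k ≤ pvMatch Al.reverse Bl.reverse := by
  have hdrop : Bl.reverse.take k = (Bl.drop (Bl.length - k)).reverse := by
    rw [List.take_reverse]
  rw [pvSub_iff]
  constructor
  · intro hs
    apply pvMatch_ge Al.reverse Bl.reverse k (by simpa using hk)
    rw [hdrop]
    exact hs.reverse
  · intro hle
    have h1 : (Bl.reverse.take k).Sublist (Bl.reverse.take (pvMatch Al.reverse Bl.reverse)) := by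
      rw [show k = min k (pvMatch Al.reverse Bl.reverse) by omega, ← List.take_take]
      exact List.take_sublist _ _
    have h2 := h1.trans (pvMatch_take_sublist Al.reverse Bl.reverse)
    rw [hdrop] at h2
    simpa using h2.reverse

-- binary search converges to M when ok k ⟺ k ≤ M on the interval
lemma pvBS_eq (Al Bl : List Char) (n : Int) (lo hi M : Int)
    (h1 : lo ≤ M) (h2 : M ≤ hi)
    (hok : ∀ k : Int, lo ≤ k → k ≤ hi →
      (pvSub (PySem.List.slice Bl (some (n - k)) none) Al = true ↔ k ≤ M)) :
    pvBS Al Bl n lo hi = M := by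
  fun_induction pvBS Al Bl n lo hi with
  | case1 lo hi h mid hif ih =>
    have hb := PySem.Int.floordiv_two_mid_bounds (lo := lo + 1) (hi := hi) (by omega)
    rw [show lo + 1 + hi = lo + hi + 1 by ring] at hb
    have hmid : mid ≤ M := (hok mid (by omega) (by omega)).mp hif
    exact ih hmid h2 (fun k hk1 hk2 => hok k (by omega) hk2)
  | case2 lo hi h mid hif ih =>
    have hb := PySem.Int.floordiv_two_mid_bounds (lo := lo + 1) (hi := hi) (by omega)
    rw [show lo + 1 + hi = lo + hi + 1 by ring] at hb
    have hmid : ¬ mid ≤ M := fun hle => hif (by rw [hok mid (by omega) (by omega)]; exact hle) 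
    exact ih h1 (by omega) (fun k hk1 hk2 => hok k hk1 (by omega))
  | case3 lo hi h => omega

-- A's dict phase: the leftover counts (unchanged from the counting semantics)
lemma getD_foldl_insert_sub_one (l : List Char) (d : PySem.Dict Char Int) (v : Char) :
    (l.foldl (fun d x => d.insert x (d.getD x 0 - 1)) d).getD v 0 = d.getD v 0 - l.count v := by
  induction l generalizing d with
  | nil => simp
  | cons c t ih =>
    rw [List.foldl_cons, ih, PySem.Dict.getD_insert, List.count_cons]
    by_cases h : v = c
    · simp [h]; ring
    · simp [h]; exact fun hh => h hh.symm

lemma d2_getD (As Bs : List Char) (v : Char) :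
    (Bs.foldl (fun d c => d.insert c (d.getD c 0 - 1))
      (As.foldl (fun d c => d.insert c (d.getD c 0 + 1)) (PySem.Dict.empty (κ := Char) (ν := Int)))).getD v 0
      = (As.count v : Int) - Bs.count v := by
  rw [getD_foldl_insert_sub_one, PySem.Dict.foldl_insert_getD_add_one_eq_counter,
    PySem.Dict.getD_counter]

lemma d2_keys_nodup (As Bs : List Char) :
    (Bs.foldl (fun d c => d.insert c (d.getD c 0 - 1))
      (As.foldl (fun d c => d.insert c (d.getD c 0 + 1)) (PySem.Dict.empty (κ := Char) (ν := Int)))).keys.Nodup :=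
  PySem.Dict.nodup_keys_foldl_insert _ _ _
    (PySem.Dict.nodup_keys_foldl_insert _ _ _ PySem.Dict.nodup_keys_empty)

lemma d2_mem_keys (As Bs : List Char) (v : Char) :
    v ∈ (Bs.foldl (fun d c => d.insert c (d.getD c 0 - 1))
      (As.foldl (fun d c => d.insert c (d.getD c 0 + 1)) (PySem.Dict.empty (κ := Char) (ν := Int)))).keys
      ↔ v ∈ As ∨ v ∈ Bs := by
  rw [PySem.Dict.keys_foldl_insert, PySem.Set.mem_update,
    PySem.Dict.foldl_insert_getD_add_one_eq_counter, PySem.Dict.keys_counter,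
    PySem.Set.mem_ofList]

-- any(d.values()) is false iff every character count cancels, i.e. A and B are anagrams
lemma any_values_eq_false_iff (As Bs : List Char) :
    ((Bs.foldl (fun d c => d.insert c (d.getD c 0 - 1))
      (As.foldl (fun d c => d.insert c (d.getD c 0 + 1)) (PySem.Dict.empty (κ := Char) (ν := Int)))).values.any
        (fun v => v ≠ 0)) = false ↔ As.Perm Bs := by
  set d2 := (Bs.foldl (fun d c => d.insert c (d.getD c 0 - 1))
      (As.foldl (fun d c => d.insert c (d.getD c 0 + 1)) (PySem.Dict.empty (κ := Char) (ν := Int)))) with hd2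
  rw [PySem.Dict.values_eq_map_keys d2 (d2_keys_nodup As Bs) 0]
  rw [List.perm_iff_count]
  constructor
  · intro h v
    simp only [List.any_map, List.any_eq_false, Function.comp] at h
    by_cases hv : v ∈ d2.keys
    · have := h v hv
      have hg := d2_getD As Bs v
      rw [← hd2] at hg
      simp only [ne_eq, decide_not, Bool.not_eq_true', decide_eq_false_iff_not, not_not] at this
      rw [hg] at this
      omega
    · rw [hd2, d2_mem_keys] at hv
      rw [not_or] at hv
      simp [List.count_eq_zero_of_not_mem hv.1, List.count_eq_zero_of_not_mem hv.2]
  · intro h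
    simp only [List.any_map, List.any_eq_false, Function.comp]
    intro v _
    have hg := d2_getD As Bs v
    rw [← hd2] at hg
    simp only [ne_eq, decide_not, Bool.not_eq_true', decide_eq_false_iff_not, not_not]
    rw [hg, h v]
    ring

-- ===== VERDICT (by name: the statement is the Claim_ definition above) =====
theorem transform_spec : Claim_equal_transform := by
  intro A B _
  unfold Spec_transform transform transform_alt pvSuffix
  simp only
  have hkey := any_values_eq_false_iff A.toList B.toList
  have hsorted := PySem.List.sorted_id_eq_sorted_id_iff_perm (xs := A.toList) (ys := B.toList)
  by_cases hp : A.toList.Perm B.toList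
  · have h1 := hkey.2 hp
    have h2 := hsorted.2 hp
    rw [h1, if_neg Bool.false_ne_true, if_neg (not_not_intro h2)]
    -- both sides are n - pvMatch revA revB
    have hlen : A.toList.length = B.toList.length := hp.length_eq
    set Al := A.toList
    set Bl := B.toList
    set n : Nat := Bl.length with hn
    set M : Nat := pvMatch Al.reverse Bl.reverse with hM
    have hMle : M ≤ n := by
      have := pvMatch_le Al.reverse Bl.reverse
      simpa [hn] using this
    have hfold := pvSuffix_eq Bl Al.reverse n (by simp [hlen]) (le_refl n)
    rw [List.take_length] at hfold
    rw [hfold]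
    have hbs : pvBS Al Bl (n : Int) 0 (n : Int) = (M : Int) := by
      apply pvBS_eq Al Bl (n : Int) 0 (n : Int) (M : Int) (by positivity) (by exact_mod_cast hMle)
      intro k hk0 hkn
      have hsl : PySem.List.slice Bl (some ((n : Int) - k)) none = Bl.drop (n - k.toNat) := by
        rw [PySem.List.slice_from _ (by omega)]
        congr 1
        omega
      rw [hsl]
      have := ok_iff Al Bl k.toNat (by omega)
      rw [← hn] at this
      rw [this, ← hM]
      omega
    rw [hbs]
    ring
  · have h1 : ((B.toList.foldl (fun d c => d.insert c (d.getD c 0 - 1))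
        (A.toList.foldl (fun d c => d.insert c (d.getD c 0 + 1)) (PySem.Dict.empty (κ := Char) (ν := Int)))).values.any
          (fun v => v ≠ 0)) = true := by
      cases h : ((B.toList.foldl (fun d c => d.insert c (d.getD c 0 - 1))
        (A.toList.foldl (fun d c => d.insert c (d.getD c 0 + 1)) (PySem.Dict.empty (κ := Char) (ν := Int)))).values.any
          (fun v => v ≠ 0)) with
      | false => exact absurd (hkey.1 h) hp
      | true => rfl
    have h2 : PySem.List.sorted A.toList (fun c => c) false ≠ PySem.List.sorted B.toList (fun c => c) false :=
      fun h => hp (hsorted.1 h)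
    rw [h1, if_pos rfl, if_pos h2]
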